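-- pv_equiv track=rewrite | github.com/ameyarawat/password-strength-checker-cli | password_strength_checker.py | contains_sequence
-- ===== SOURCE A (Python) =====
-- def contains_sequence(text: str, min_len: int = 4) -> bool:
--     if len(text) < min_len:
--         return False
--     # Check ascending/descending sequences by ord value
--     asc = 1
--     desc = 1
--     for i in range(1, len(text)):
--         if ord(text[i]) - ord(text[i - 1]) == 1:
--             asc += 1
--             desc = 1
--         elif ord(text[i]) - ord(text[i - 1]) == -1:
--             desc += 1
--             asc = 1
--         else:
--             asc = 1
--             desc = 1
--         if asc >= min_len or desc >= min_len:
--             return True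
--     return False
-- ===== SOURCE B (Python) =====
-- def contains_sequence(text: str, min_len: int = 4) -> bool:
--     # Different decomposition: build the table of consecutive ord-differences,
--     # group it into maximal runs of equal step, and compare the longest +1/-1
--     # run (in steps) against min_len - 1.
--     if len(text) < max(min_len, 2):
--         return False
--     diffs = [ord(b) - ord(a) for a, b in zip(text, text[1:])]
--     runs = []
--     cur, cnt = diffs[0], 0
--     for d in diffs:
--         if d == cur:
--             cnt += 1
--         else:
--             runs.append((cur, cnt))
--             cur, cnt = d, 1
--     runs.append((cur, cnt))
--     best = 0
--     for v, c in runs: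
--         if v in (1, -1) and c > best:
--             best = c
--     return best >= min_len - 1
-- ===== Notes on version B (the rewrite author's own statement) =====
-- stated objective: alternative
-- what changed: Replaces A's inline asc/desc running counters with early return by a build-the-diff-table, group-into-maximal-runs, then take-the-longest +/-1 run decomposition compared against min_len-1 steps.
import Mathlib
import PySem

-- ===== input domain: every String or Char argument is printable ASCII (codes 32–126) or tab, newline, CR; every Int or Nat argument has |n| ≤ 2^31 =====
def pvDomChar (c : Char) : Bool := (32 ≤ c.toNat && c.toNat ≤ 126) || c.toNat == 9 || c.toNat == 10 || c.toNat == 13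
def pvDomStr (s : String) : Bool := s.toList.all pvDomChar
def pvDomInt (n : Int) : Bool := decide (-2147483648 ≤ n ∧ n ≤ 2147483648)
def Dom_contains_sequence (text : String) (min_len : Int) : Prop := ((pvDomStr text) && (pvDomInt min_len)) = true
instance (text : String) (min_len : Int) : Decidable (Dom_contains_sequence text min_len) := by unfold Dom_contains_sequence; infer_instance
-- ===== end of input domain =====

-- B re-implements A by a different decomposition: build the table of consecutive
-- ord-differences, group it into maximal equal-step runs, and compare the longest
-- +1/-1 run (in steps) against min_len - 1; same O(n) cost, no speed claim.


-- ===== PORT A =====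
-- A's loop over i in range(1, len(text)) with state (asc, desc), carried as a
-- structural recursion holding the previous character.
def csLoopA (m : Int) (prev : Char) (asc desc : Int) : List Char → Bool
  | [] => false
  | c :: cs =>
    let d : Int := (c.toNat : Int) - (prev.toNat : Int)
    let asc' := if d = 1 then asc + 1 else 1
    let desc' := if d = -1 then desc + 1 else 1
    if asc' ≥ m ∨ desc' ≥ m then true else csLoopA m c asc' desc' cs

def contains_sequence (text : String) (min_len : Int) : Bool :=
  if (text.toList.length : Int) < min_len then false
  else
    match text.toList with
    | [] => false
    | c :: cs => csLoopA min_len c 1 1 cs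

-- ===== PORT B =====
-- grouping-fold step of Source B's first loop: state = (closed runs, current value, current count)
def runStepB (st : List (Int × Int) × Int × Int) (d : Int) : List (Int × Int) × Int × Int :=
  if d = st.2.1 then (st.1, st.2.1, st.2.2 + 1) else (st.1 ++ [(st.2.1, st.2.2)], d, 1)

-- step of Source B's second loop (longest +/-1 run)
def bestStepB (best : Int) (vc : Int × Int) : Int :=
  if (vc.1 = 1 ∨ vc.1 = -1) ∧ vc.2 > best then vc.2 else best

def contains_sequence_alt (text : String) (min_len : Int) : Bool :=
  let cs := text.toList
  if (cs.length : Int) < max min_len 2 then false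
  else
    let diffs := (cs.zip cs.tail).map (fun p => ((p.2.toNat : Int) - (p.1.toNat : Int)))
    match diffs with
    | [] => false   -- unreachable: the guard guarantees at least two characters
    | d0 :: _ =>
      let s := diffs.foldl runStepB ([], d0, 0)
      let runs := s.1 ++ [(s.2.1, s.2.2)]
      decide (runs.foldl bestStepB 0 ≥ min_len - 1)

-- ===== PRECONDITION & SPEC =====
def Spec_contains_sequence (text : String) (min_len : Int) (out : Bool) : Prop := out = contains_sequence_alt text min_len
instance (text : String) (min_len : Int) (out : Bool) : Decidable (Spec_contains_sequence text min_len out) := by unfold Spec_contains_sequence; infer_instance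

-- ===== CLAIM (what is proved, stated in full; the proofs are below) =====
def Claim_equal_contains_sequence : Prop := ∀ (text : String) (min_len : Int), Dom_contains_sequence text min_len → Spec_contains_sequence text min_len (contains_sequence text min_len)

-- ===== LEMMAS AND PROOFS =====


def pvAloop (m asc desc : Int) : List Int → Bool
  | [] => false
  | d :: ds =>
    let asc' := if d = 1 then asc + 1 else 1
    let desc' := if d = -1 then desc + 1 else 1
    if asc' ≥ m ∨ desc' ≥ m then true else pvAloop m asc' desc' ds

def pvP (m : Int) (vc : Int × Int) : Bool := decide ((vc.1 = 1 ∨ vc.1 = -1) ∧ vc.2 ≥ m - 1)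

def pvQany (m cur cnt : Int) : List Int → Bool
  | [] => pvP m (cur, cnt)
  | d :: ds => if d = cur then pvQany m cur (cnt + 1) ds else pvP m (cur, cnt) || pvQany m d 1 ds

theorem pv_qany_of_P (m : Int) (ds : List Int) : ∀ (cur cnt : Int),
    pvP m (cur, cnt) = true → pvQany m cur cnt ds = true := by
  induction ds with
  | nil => intro cur cnt h; simpa [pvQany] using h
  | cons d ds ih =>
    intro cur cnt h
    simp only [pvQany]
    split_ifs with hd
    · apply ih
      simp only [pvP, decide_eq_true_eq] at h ⊢
      omega
    · simp [h]


theorem pv_main (m : Int) (hm : 2 ≤ m) (ds : List Int) : ∀ (cur cnt : Int), 1 ≤ cnt →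
    pvP m (cur, cnt) = false →
    pvAloop m (if cur = 1 then cnt + 1 else 1) (if cur = -1 then cnt + 1 else 1) ds
      = pvQany m cur cnt ds := by
  have hPmk : ∀ (v c : Int), (v = 1 ∨ v = -1) → m - 1 ≤ c → pvP m (v, c) = true := by
    intro v c hv hc; simp only [pvP, decide_eq_true_eq]; exact ⟨hv, hc⟩
  have hPmk' : ∀ (v c : Int), ((v = 1 ∨ v = -1) → c < m - 1) → pvP m (v, c) = false := by
    intro v c h; simp only [pvP, decide_eq_false_iff_not, not_and, not_le]
    intro hv; exact h hv
  induction ds with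
  | nil => intro cur cnt h1 hP; simp [pvAloop, pvQany, hP]
  | cons d ds ih =>
    intro cur cnt h1 hP
    have hPn : (cur = 1 ∨ cur = -1) → cnt + 1 < m := by
      simpa [pvP, not_le] using hP
    by_cases hd1 : d = 1
    · subst hd1
      by_cases hc1 : cur = 1
      · subst hc1
        simp only [pvAloop, pvQany]
        norm_num
        by_cases hc : m ≤ cnt + 1 + 1
        · rw [decide_eq_true hc]
          simp [pv_qany_of_P m ds 1 (cnt + 1) (hPmk 1 (cnt + 1) (Or.inl rfl) (by omega))]
        · rw [decide_eq_false hc, decide_eq_false (by omega : ¬ m ≤ 1)]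
          simpa using ih 1 (cnt + 1) (by omega) (hPmk' 1 (cnt + 1) (fun _ => by omega))
      · have hdc : ¬((1:Int) = cur) := fun h => hc1 h.symm
        simp only [pvAloop, pvQany, if_neg hc1, if_neg hdc]
        norm_num [hP]
        by_cases hc : m ≤ 2
        · rw [decide_eq_true hc]
          simp [pv_qany_of_P m ds 1 1 (hPmk 1 1 (Or.inl rfl) (by omega))]
        · rw [decide_eq_false hc, decide_eq_false (by omega : ¬ m ≤ 1)]
          simpa using ih 1 1 (by omega) (hPmk' 1 1 (fun _ => by omega))
    · by_cases hdn : d = -1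
      · subst hdn
        by_cases hc1 : cur = -1
        · subst hc1
          simp only [pvAloop, pvQany]
          norm_num
          by_cases hc : m ≤ cnt + 1 + 1
          · rw [decide_eq_true hc]
            simp [pv_qany_of_P m ds (-1) (cnt + 1) (hPmk (-1) (cnt + 1) (Or.inr rfl) (by omega))]
          · rw [decide_eq_false hc, decide_eq_false (by omega : ¬ m ≤ 1)]
            simpa using ih (-1) (cnt + 1) (by omega) (hPmk' (-1) (cnt + 1) (fun _ => by omega))
        · have hdc : ¬((-1:Int) = cur) := fun h => hc1 h.symm
          simp only [pvAloop, pvQany, if_neg hc1, if_neg hdc]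
          norm_num [hP]
          by_cases hc : m ≤ 2
          · rw [decide_eq_true hc]
            simp [pv_qany_of_P m ds (-1) 1 (hPmk (-1) 1 (Or.inr rfl) (by omega))]
          · rw [decide_eq_false hc, decide_eq_false (by omega : ¬ m ≤ 1)]
            simpa using ih (-1) 1 (by omega) (hPmk' (-1) 1 (fun _ => by omega))
      · by_cases hdc : d = cur
        · subst hdc
          simp only [pvAloop, pvQany, if_neg hd1, if_neg hdn]
          rw [if_neg (by omega : ¬((1:Int) ≥ m ∨ (1:Int) ≥ m))]
          simpa [if_neg hd1, if_neg hdn] using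
            ih d (cnt + 1) (by omega) (hPmk' d (cnt + 1) (fun h => absurd h (by tauto)))
        · simp only [pvAloop, pvQany, if_neg hd1, if_neg hdn, if_neg hdc, hP, Bool.false_or]
          rw [if_neg (by omega : ¬((1:Int) ≥ m ∨ (1:Int) ≥ m))]
          simpa [if_neg hd1, if_neg hdn] using
            ih d 1 (by omega) (hPmk' d 1 (fun h => absurd h (by tauto)))

def pvMkDiffs (prev : Char) : List Char → List Int
  | [] => []
  | c :: cs => ((c.toNat : Int) - (prev.toNat : Int)) :: pvMkDiffs c cs

theorem pv_csLoopA_eq_aloop (m : Int) (cs : List Char) : ∀ (prev : Char) (asc desc : Int),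
    csLoopA m prev asc desc cs = pvAloop m asc desc (pvMkDiffs prev cs) := by
  induction cs with
  | nil => intro prev asc desc; simp [csLoopA, pvMkDiffs, pvAloop]
  | cons c cs ih =>
    intro prev asc desc
    simp only [csLoopA, pvMkDiffs, pvAloop]
    split_ifs <;> simp_all

theorem pv_zip_map_eq_mkDiffs (cs : List Char) : ∀ (c : Char),
    ((c :: cs).zip cs).map (fun p => ((p.2.toNat : Int) - (p.1.toNat : Int))) = pvMkDiffs c cs := by
  induction cs with
  | nil => intro c; simp [pvMkDiffs]
  | cons c' cs ih =>
    intro c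
    rw [show (c :: c' :: cs).zip (c' :: cs) = (c, c') :: ((c' :: cs).zip cs) from rfl]
    simp only [List.map_cons, ih c', pvMkDiffs]

theorem pv_foldkey (m : Int) (ds : List Int) : ∀ (runs : List (Int × Int)) (cur cnt : Int),
    (((ds.foldl runStepB (runs, cur, cnt)).1
        ++ [((ds.foldl runStepB (runs, cur, cnt)).2.1, (ds.foldl runStepB (runs, cur, cnt)).2.2)]).any (pvP m))
      = (runs.any (pvP m) || pvQany m cur cnt ds) := by
  induction ds with
  | nil => intro runs cur cnt; simp [pvQany]
  | cons d ds ih =>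
    intro runs cur cnt
    simp only [List.foldl_cons, runStepB]
    by_cases hd : d = cur
    · simp only [if_pos hd, pvQany]
      exact ih runs cur (cnt + 1)
    · simp only [if_neg hd, pvQany]
      rw [ih (runs ++ [(cur, cnt)]) d 1]
      simp [Bool.or_assoc]

theorem pv_maxany (m : Int) (runs : List (Int × Int)) : ∀ (b : Int), 0 ≤ b →
    (runs.foldl bestStepB b ≥ m - 1 ↔ (b ≥ m - 1 ∨ runs.any (pvP m) = true)) := by
  induction runs with
  | nil => intro b hb; simp
  | cons vc runs ih =>
    intro b hb
    simp only [List.foldl_cons, bestStepB, List.any_cons, Bool.or_eq_true]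
    split_ifs with h
    · rw [ih vc.2 (by omega)]
      constructor
      · rintro (h1 | h2)
        · exact Or.inr (Or.inl (by simp only [pvP, decide_eq_true_eq]; exact ⟨h.1, h1⟩))
        · exact Or.inr (Or.inr h2)
      · rintro (h1 | h2 | h3)
        · exact Or.inl (by omega)
        · simp only [pvP, decide_eq_true_eq] at h2; exact Or.inl h2.2
        · exact Or.inr h3
    · rw [ih b hb]
      constructor
      · rintro (h1 | h2)
        · exact Or.inl h1
        · exact Or.inr (Or.inr h2)
      · rintro (h1 | h2 | h3)
        · exact Or.inl h1
        · simp only [pvP, decide_eq_true_eq] at h2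
          rcases h2 with ⟨hv, hc⟩
          have hvb : vc.2 ≤ b := by
            by_contra hgt
            exact h ⟨hv, by omega⟩
          exact Or.inl (by omega)
        · exact Or.inr h3

-- list-level top theorem
theorem pv_top (m : Int) (c0 c1 : Char) (rest : List Char) :
    (let cs := c0 :: c1 :: rest
     (if (cs.length : Int) < m then false else pvAloop m 1 1 (pvMkDiffs c0 (c1 :: rest))))
    = (let cs := c0 :: c1 :: rest
       if (cs.length : Int) < max m 2 then false
       else
         let d0 := (c1.toNat : Int) - (c0.toNat : Int)
         let s := (pvMkDiffs c0 (c1 :: rest)).foldl runStepB ([], d0, 0)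
         let runs := s.1 ++ [(s.2.1, s.2.2)]
         decide (runs.foldl bestStepB 0 ≥ m - 1)) := by
  simp only []
  have hdiffs : pvMkDiffs c0 (c1 :: rest) = ((c1.toNat : Int) - (c0.toNat : Int)) :: pvMkDiffs c1 rest := rfl
  set d0 := (c1.toNat : Int) - (c0.toNat : Int) with hd0
  set drest := pvMkDiffs c1 rest with hdr
  have hany : ((((d0 :: drest).foldl runStepB ([], d0, 0)).1
      ++ [(((d0 :: drest).foldl runStepB ([], d0, 0)).2.1, ((d0 :: drest).foldl runStepB ([], d0, 0)).2.2)]).any (pvP m))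
      = pvQany m d0 1 drest := by
    rw [pv_foldkey m (d0 :: drest) [] d0 0]
    simp [pvQany]
  by_cases hm : m ≤ 1
  · -- A: guard passes (length ≥ 2 > m), first step fires; B: best ≥ m - 1 trivially
    rw [if_neg (by simp only [List.length_cons]; push_cast; omega),
       if_neg (by simp only [List.length_cons, lt_max_iff, not_or]; push_cast; omega :
         ¬((((c0 :: c1 :: rest).length : Int)) < max m 2))]
    rw [hdiffs]
    have hA : pvAloop m 1 1 (d0 :: drest) = true := by
      simp only [pvAloop]
      rw [if_pos (Or.inl (by split_ifs <;> omega))]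
    rw [hA]
    have := (pv_maxany m ((((d0 :: drest).foldl runStepB ([], d0, 0)).1
      ++ [(((d0 :: drest).foldl runStepB ([], d0, 0)).2.1, ((d0 :: drest).foldl runStepB ([], d0, 0)).2.2)])) 0 le_rfl)
    rw [eq_comm, decide_eq_true_eq, this]
    left; omega
  · have hmax : max m 2 = m := max_eq_left (by omega)
    rw [hmax]
    by_cases hlen : ((c0 :: c1 :: rest).length : Int) < m
    · rw [if_pos hlen, if_pos hlen]
    · rw [if_neg hlen, if_neg hlen, hdiffs]
      have hiff : ((((d0 :: drest).foldl runStepB ([], d0, 0)).1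
          ++ [(((d0 :: drest).foldl runStepB ([], d0, 0)).2.1, ((d0 :: drest).foldl runStepB ([], d0, 0)).2.2)]).foldl bestStepB 0 ≥ m - 1) ↔ pvQany m d0 1 drest = true := by
        rw [pv_maxany m _ 0 le_rfl, hany]
        constructor
        · rintro (h | h); · omega
          · exact h
        · exact fun h => Or.inr h
      by_cases hP0 : pvP m (d0, 1) = true
      · have hq : pvQany m d0 1 drest = true := pv_qany_of_P m drest d0 1 hP0
        have hA : pvAloop m 1 1 (d0 :: drest) = true := by
          simp only [pvP, decide_eq_true_eq] at hP0
          simp only [pvAloop]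
          rcases hP0 with ⟨hv, hc⟩
          rcases hv with hv | hv
          · rw [if_pos (Or.inl (by rw [if_pos hv]; omega))]
          · rw [if_pos (Or.inr (by rw [if_pos hv]; omega))]
        rw [hA, eq_comm, decide_eq_true_eq, hiff, hq]
      · have hP0f : pvP m (d0, 1) = false := by simpa using hP0
        have hP0' : (d0 = 1 ∨ d0 = -1) → (2 : Int) < m := by
          simpa [pvP, not_le] using hP0
        have hA : pvAloop m 1 1 (d0 :: drest) = pvQany m d0 1 drest := by
          simp only [pvAloop]
          rw [if_neg]
          · have := pv_main m (by omega) drest d0 1 le_rfl hP0f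
            simpa using this
          · rintro (h | h)
            · by_cases h1 : d0 = 1
              · have := hP0' (Or.inl h1); rw [if_pos h1] at h; omega
              · rw [if_neg h1] at h; omega
            · by_cases h1 : d0 = -1
              · have := hP0' (Or.inr h1); rw [if_pos h1] at h; omega
              · rw [if_neg h1] at h; omega
        rw [hA]
        cases hq : pvQany m d0 1 drest
        · rw [eq_comm, decide_eq_false_iff_not]
          rw [hiff]; simp [hq]
        · rw [eq_comm, decide_eq_true_eq, hiff]
          exact hq

-- ===== VERDICT (by name: the statement is the Claim_ definition above) =====
theorem contains_sequence_spec : Claim_equal_contains_sequence := by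
  intro text m _
  unfold Spec_contains_sequence
  rcases hcs : text.toList with _ | ⟨c0, rest0⟩
  · simp only [contains_sequence, contains_sequence_alt, hcs]
    have h2 : ((List.nil (α := Char)).length : Int) < max m 2 := by
      simp only [List.length_nil, Nat.cast_zero]
      exact lt_of_lt_of_le (by norm_num) (le_max_right m 2)
    rw [if_pos h2]
    split_ifs <;> rfl
  · rcases rest0 with _ | ⟨c1, rest⟩
    · simp only [contains_sequence, contains_sequence_alt, hcs]
      have h2 : (([c0].length : Int)) < max m 2 := by
        simp only [List.length_cons, List.length_nil]
        exact lt_of_lt_of_le (by norm_num) (le_max_right m 2)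
      rw [if_pos h2]
      split_ifs
      · rfl
      · simp [csLoopA]
    · simp only [contains_sequence, contains_sequence_alt, hcs, List.tail_cons]
      rw [pv_csLoopA_eq_aloop, pv_zip_map_eq_mkDiffs (c1 :: rest) c0]
      exact pv_top m c0 c1 rest
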